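-- pv_equiv track=rewrite | github.com/acybppres/Lothar | Collatz/kenglish/mrlattice.py | generationAffineTupFromPath
-- ===== SOURCE A (Python) =====
-- N_i = ((0,0), [])
--
-- def F_0(mr_tup):
--     return ( (mr_tup[0][0]+1, mr_tup[0][1]-1), mr_tup[1] + [(mr_tup[0][0], mr_tup[0][1]-1)] )
--
-- def F_1(mr_tup):
--     return ((mr_tup[0][0]+1, mr_tup[0][1]), mr_tup[1])
--
-- def mrTupToGenerationAffineTup(T):
--     a_b = T[0]
--     a_b_ = (a_b[0], -a_b[1])
--     L = T[1]
--     L_ = []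
--     for c_d in L:
--         c_d_ = (c_d[0], a_b_[1] + c_d[1])
--         L_.append(c_d_)
--     AT = (a_b_, L_)
--     return AT
--
-- def generationAffineTupFromPath(label):
--     """ Create an  given a path (label)
--     """
--     mr_tup = N_i
--     for bit in label:
--         if bit == "1":
--             mr_tup = F_1(mr_tup)
--         else:
--             mr_tup = F_0(mr_tup)
--     return mrTupToGenerationAffineTup(mr_tup)
-- ===== SOURCE B (Python) =====
-- def generationAffineTupFromPath(label):
--     """ Create an  given a path (label)
--     """
--     items = list(label)
--     n = len(items)
--     z = sum(1 for bit in items if bit != "1")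
--     out = []
--     remaining = z
--     for i, bit in enumerate(items):
--         if bit != "1":
--             remaining -= 1
--             out.append((i, remaining))
--     return ((n, z), out)
-- ===== Notes on version B (the rewrite author's own statement) =====
-- stated objective: faster
-- what changed: Replaces the F_0/F_1 state-machine fold (whose accumulator is copied by list + [entry] at every zero step) plus the negate-and-shift conversion pass with a single direct computation: count the non-'1' elements once, then emit (index, zeros-remaining-after) for each non-'1' position in one enumerate walk appending in place.
import Mathlib
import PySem

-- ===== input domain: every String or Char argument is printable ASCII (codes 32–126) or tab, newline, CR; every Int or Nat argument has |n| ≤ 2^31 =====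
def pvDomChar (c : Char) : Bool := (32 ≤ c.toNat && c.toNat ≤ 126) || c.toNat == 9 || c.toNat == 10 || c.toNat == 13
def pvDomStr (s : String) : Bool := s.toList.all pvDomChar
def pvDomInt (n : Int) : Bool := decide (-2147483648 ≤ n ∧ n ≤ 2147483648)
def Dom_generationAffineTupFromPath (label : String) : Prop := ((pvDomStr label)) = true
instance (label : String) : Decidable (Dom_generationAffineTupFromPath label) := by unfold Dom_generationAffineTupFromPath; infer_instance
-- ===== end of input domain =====

-- B replaces A's F_0/F_1 state-machine fold plus negate-and-shift conversion pass with one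
-- direct computation (count non-'1' elements once, then emit (index, zeros-remaining-after)
-- per non-'1' position in a single enumerate walk); objective: simpler.

-- ===== PORT A =====
def pvNi : (Int × Int) × List (Int × Int) := ((0, 0), [])

def pvF0 (t : (Int × Int) × List (Int × Int)) : (Int × Int) × List (Int × Int) :=
  ((t.1.1 + 1, t.1.2 - 1), t.2 ++ [(t.1.1, t.1.2 - 1)])

def pvF1 (t : (Int × Int) × List (Int × Int)) : (Int × Int) × List (Int × Int) :=
  ((t.1.1 + 1, t.1.2), t.2)

def pvMrTupToGenerationAffineTup (T : (Int × Int) × List (Int × Int)) :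
    (Int × Int) × List (Int × Int) :=
  let a_b := T.1
  let a_b_ := (a_b.1, -a_b.2)
  let L := T.2
  let L_ := L.foldl (fun acc c_d => acc ++ [(c_d.1, a_b_.2 + c_d.2)]) []
  (a_b_, L_)

def generationAffineTupFromPath (label : String) : (Int × Int) × (List (Int × Int)) :=
  pvMrTupToGenerationAffineTup
    (label.toList.foldl (fun t bit => if bit = '1' then pvF1 t else pvF0 t) pvNi)

-- ===== PORT B =====
def generationAffineTupFromPath_alt (label : String) : (Int × Int) × (List (Int × Int)) :=
  let items := label.toList
  let n : Int := items.length
  let z : Int := items.foldl (fun acc bit => if bit ≠ '1' then acc + 1 else acc) 0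
  let fin := (PySem.List.enumerate items).foldl
    (fun (st : Int × List (Int × Int)) p =>
      if p.2 ≠ '1' then (st.1 - 1, st.2 ++ [(p.1, st.1 - 1)]) else st)
    (z, [])
  ((n, z), fin.2)

-- ===== PRECONDITION & SPEC =====
def Spec_generationAffineTupFromPath (label : String) (out : (Int × Int) × (List (Int × Int))) : Prop := out = generationAffineTupFromPath_alt label
instance (label : String) (out : (Int × Int) × (List (Int × Int))) : Decidable (Spec_generationAffineTupFromPath label out) := by unfold Spec_generationAffineTupFromPath; infer_instance

-- ===== CLAIM (what is proved, stated in full; the proofs are below) =====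
def Claim_equal_generationAffineTupFromPath : Prop := ∀ (label : String), Dom_generationAffineTupFromPath label → Spec_generationAffineTupFromPath label (generationAffineTupFromPath label)

-- ===== LEMMAS AND PROOFS =====

-- number of non-'1' characters
def pvZc : List Char → Int
  | [] => 0
  | c :: cs => (if c ≠ '1' then 1 else 0) + pvZc cs

-- entries produced by A's state machine starting at index i with running second coord y
def pvEntsA (i y : Int) : List Char → List (Int × Int)
  | [] => []
  | c :: cs => if c = '1' then pvEntsA (i + 1) y cs
               else (i, y - 1) :: pvEntsA (i + 1) (y - 1) cs

-- entries produced by B's walk starting at index i with remaining r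
def pvEntsB (i r : Int) : List Char → List (Int × Int)
  | [] => []
  | c :: cs => if c ≠ '1' then (i, r - 1) :: pvEntsB (i + 1) (r - 1) cs
               else pvEntsB (i + 1) r cs

theorem pvZc_foldl (cs : List Char) (a : Int) :
    cs.foldl (fun acc bit => if bit ≠ '1' then acc + 1 else acc) a = a + pvZc cs := by
  induction cs generalizing a with
  | nil => simp [pvZc]
  | cons c cs ih =>
    simp only [List.foldl_cons]
    by_cases h : c = '1'
    · rw [if_neg (by simp [h]), ih]; simp [pvZc, h]
    · rw [if_pos h, ih]; simp [pvZc, h]; ring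

theorem pvFoldA (cs : List Char) (i y : Int) (L : List (Int × Int)) :
    cs.foldl (fun t bit => if bit = '1' then pvF1 t else pvF0 t) ((i, y), L)
      = ((i + cs.length, y - pvZc cs), L ++ pvEntsA i y cs) := by
  induction cs generalizing i y L with
  | nil => simp [pvZc, pvEntsA]
  | cons c cs ih =>
    simp only [List.foldl_cons]
    by_cases h : c = '1'
    · rw [if_pos h, show pvF1 ((i, y), L) = ((i + 1, y), L) from rfl, ih]
      simp [pvEntsA, pvZc, h, Prod.ext_iff]
      omega
    · rw [if_neg h,
        show pvF0 ((i, y), L) = ((i + 1, y - 1), L ++ [(i, y - 1)]) from rfl, ih]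
      simp [pvEntsA, pvZc, h, Prod.ext_iff]
      omega

theorem pvConvFold (L : List (Int × Int)) (t : Int) (acc : List (Int × Int)) :
    L.foldl (fun acc c_d => acc ++ [(c_d.1, t + c_d.2)]) acc
      = acc ++ L.map (fun c_d => (c_d.1, t + c_d.2)) := by
  induction L generalizing acc with
  | nil => simp
  | cons p L ih => simp [ih]

theorem pvMapEnts (cs : List Char) (i y t : Int) :
    (pvEntsA i y cs).map (fun c_d => (c_d.1, t + c_d.2)) = pvEntsB i (t + y) cs := by
  induction cs generalizing i y with
  | nil => simp [pvEntsA, pvEntsB]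
  | cons c cs ih =>
    by_cases h : c = '1'
    · simp [pvEntsA, pvEntsB, h, ih]
    · simp only [pvEntsA, pvEntsB, h, List.map_cons, ite_false, ne_eq,
        not_false_iff, if_true]
      rw [show t + y - 1 = t + (y - 1) by ring, ih]

theorem pvFoldB (cs : List Char) (i r : Int) (acc : List (Int × Int)) :
    (PySem.List.enumerate cs i).foldl
      (fun (st : Int × List (Int × Int)) p =>
        if p.2 ≠ '1' then (st.1 - 1, st.2 ++ [(p.1, st.1 - 1)]) else st)
      (r, acc)
      = (r - pvZc cs, acc ++ pvEntsB i r cs) := by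
  induction cs generalizing i r acc with
  | nil => simp [PySem.List.enumerate_nil, pvZc, pvEntsB]
  | cons c cs ih =>
    rw [PySem.List.enumerate_cons]
    simp only [List.foldl_cons]
    by_cases h : c = '1'
    · rw [if_neg (by simp [h]), ih]
      simp [pvZc, pvEntsB, h]
    · rw [if_pos (by simp [h]), ih]
      simp [pvZc, pvEntsB, h, Prod.ext_iff]; ring

-- ===== VERDICT (by name: the statement is the Claim_ definition above) =====
theorem generationAffineTupFromPath_spec : Claim_equal_generationAffineTupFromPath := by
  intro label _
  unfold Spec_generationAffineTupFromPath generationAffineTupFromPath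
    generationAffineTupFromPath_alt
  dsimp only
  rw [show pvNi = ((0, 0), ([] : List (Int × Int))) from rfl]
  rw [pvFoldA, pvZc_foldl, pvFoldB]
  unfold pvMrTupToGenerationAffineTup
  dsimp only
  rw [pvConvFold]
  have hm := pvMapEnts label.toList 0 0 (pvZc label.toList)
  rw [add_zero] at hm
  simp [hm]
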